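-- pv_equiv track=rewrite | github.com/drhaun/bcompnutritiontool | recipe_database.py | _determine_category
-- ===== SOURCE A (Python) =====
-- def _determine_category(title, ingredients):
--     """Determine recipe category based on title and ingredients"""
--     title_lower = title.lower()
--     ingredients_lower = ingredients.lower()
--
--     # Check for breakfast items
--     if any(term in title_lower for term in ['breakfast', 'pancake', 'waffle', 'oat', 'muffin', 'toast', 'egg']):
--         return 'breakfast'
--
--     # Check for smoothies
--     if any(term in title_lower for term in ['smoothie', 'shake', 'protein shake']):
--         return 'smoothie'
--
--     # Check for desserts
--     if any(term in title_lower for term in ['cookie', 'dessert', 'chocolate', 'cake', 'sweet', 'crisp', 'bark']):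
--         return 'dessert'
--
--     # Check for meal prep
--     if 'meal prep' in title_lower:
--         return 'meal_prep'
--
--     # Check for lunch/dinner
--     if any(term in title_lower for term in ['bowl', 'salad', 'sandwich', 'wrap', 'burger']):
--         return 'lunch'
--
--     if any(term in title_lower for term in ['chicken', 'beef', 'salmon', 'fish', 'steak', 'casserole', 'crockpot']):
--         return 'dinner'
--
--     # Default to snack if none of the above
--     if any(term in title_lower for term in ['protein', 'bite', 'snack', 'dip']):
--         return 'snack'
--
--     # If still uncertain, check common dinner ingredients
--     if any(term in ingredients_lower for term in ['chicken breast', 'ground beef', 'fish', 'pork', 'steak']):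
--         return 'dinner'
--
--     # Default to lunch as fallback
--     return 'lunch'
-- ===== SOURCE B (Python) =====
-- # B: one flat alphabetical keyword table scanned in full with a minimum-priority
-- # accumulator, instead of A's ordered chain of early-return any() checks.
-- # Correct because each priority maps to one category, so the minimum-priority
-- # matching keyword is exactly the first rule group of A that matches.
-- _KEYWORDS = [
--     # (keyword, priority, category, search_in_ingredients)
--     ('bark', 2, 'dessert', False),
--     ('beef', 5, 'dinner', False),
--     ('bite', 6, 'snack', False),
--     ('bowl', 4, 'lunch', False),
--     ('breakfast', 0, 'breakfast', False),
--     ('burger', 4, 'lunch', False),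
--     ('cake', 2, 'dessert', False),
--     ('casserole', 5, 'dinner', False),
--     ('chicken', 5, 'dinner', False),
--     ('chicken breast', 7, 'dinner', True),
--     ('chocolate', 2, 'dessert', False),
--     ('cookie', 2, 'dessert', False),
--     ('crisp', 2, 'dessert', False),
--     ('crockpot', 5, 'dinner', False),
--     ('dessert', 2, 'dessert', False),
--     ('dip', 6, 'snack', False),
--     ('egg', 0, 'breakfast', False),
--     ('fish', 5, 'dinner', False),
--     ('fish', 7, 'dinner', True),
--     ('ground beef', 7, 'dinner', True),
--     ('meal prep', 3, 'meal_prep', False),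
--     ('muffin', 0, 'breakfast', False),
--     ('oat', 0, 'breakfast', False),
--     ('pancake', 0, 'breakfast', False),
--     ('pork', 7, 'dinner', True),
--     ('protein', 6, 'snack', False),
--     ('protein shake', 1, 'smoothie', False),
--     ('salad', 4, 'lunch', False),
--     ('salmon', 5, 'dinner', False),
--     ('sandwich', 4, 'lunch', False),
--     ('shake', 1, 'smoothie', False),
--     ('smoothie', 1, 'smoothie', False),
--     ('snack', 6, 'snack', False),
--     ('steak', 5, 'dinner', False),
--     ('steak', 7, 'dinner', True),
--     ('sweet', 2, 'dessert', False),
--     ('toast', 0, 'breakfast', False),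
--     ('waffle', 0, 'breakfast', False),
--     ('wrap', 4, 'lunch', False),
-- ]
--
-- def _determine_category(title, ingredients):
--     title_lower = title.lower()
--     ingredients_lower = ingredients.lower()
--     best = None
--     for term, prio, cat, use_ing in _KEYWORDS:
--         if (best is None or prio < best[0]) and term in (ingredients_lower if use_ing else title_lower):
--             best = (prio, cat)
--     return best[1] if best else 'lunch'
-- ===== Notes on version B (the rewrite author's own statement) =====
-- stated objective: alternative
-- what changed: A's ordered chain of early-return any() checks over grouped term lists becomes a single full scan of one flat alphabetically-sorted keyword table keeping the minimum-priority match, with priority mapped to category; no early return and a different traversal order, proved correct because the minimum-priority match equals A's first matching group.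
import Mathlib
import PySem

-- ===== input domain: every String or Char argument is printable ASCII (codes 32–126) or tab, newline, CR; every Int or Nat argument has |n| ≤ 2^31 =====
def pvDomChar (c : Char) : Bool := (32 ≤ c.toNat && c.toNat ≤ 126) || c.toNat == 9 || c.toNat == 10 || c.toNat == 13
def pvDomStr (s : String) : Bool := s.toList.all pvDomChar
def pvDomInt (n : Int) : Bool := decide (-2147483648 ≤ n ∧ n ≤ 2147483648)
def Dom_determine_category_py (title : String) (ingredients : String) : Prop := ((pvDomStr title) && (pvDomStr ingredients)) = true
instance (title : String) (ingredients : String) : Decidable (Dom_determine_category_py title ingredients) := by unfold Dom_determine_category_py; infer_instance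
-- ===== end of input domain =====

-- B replaces A's ordered chain of early-return any() checks by one full scan of a flat
-- alphabetical keyword table keeping the minimum-priority match; objective: alternative.


-- ===== PORT A =====
-- Port of A: chain of if-blocks, each an any(...) over a literal term list against
-- title_lower (last block against ingredients_lower), exactly in A's order.
def determine_category_py (title : String) (ingredients : String) : String :=
  let title_lower := PySem.Str.lower title
  let ingredients_lower := PySem.Str.lower ingredients
  if ["breakfast", "pancake", "waffle", "oat", "muffin", "toast", "egg"].any
      (fun term => PySem.Str.isIn term title_lower) then "breakfast"
  else if ["smoothie", "shake", "protein shake"].any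
      (fun term => PySem.Str.isIn term title_lower) then "smoothie"
  else if ["cookie", "dessert", "chocolate", "cake", "sweet", "crisp", "bark"].any
      (fun term => PySem.Str.isIn term title_lower) then "dessert"
  else if PySem.Str.isIn "meal prep" title_lower then "meal_prep"
  else if ["bowl", "salad", "sandwich", "wrap", "burger"].any
      (fun term => PySem.Str.isIn term title_lower) then "lunch"
  else if ["chicken", "beef", "salmon", "fish", "steak", "casserole", "crockpot"].any
      (fun term => PySem.Str.isIn term title_lower) then "dinner"
  else if ["protein", "bite", "snack", "dip"].any
      (fun term => PySem.Str.isIn term title_lower) then "snack"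
  else if ["chicken breast", "ground beef", "fish", "pork", "steak"].any
      (fun term => PySem.Str.isIn term ingredients_lower) then "dinner"
  else "lunch"

-- ===== PORT B =====
-- Port of B: the flat alphabetical keyword table from Source B.
def pvKeywords : List (String × Nat × String × Bool) :=
  [ ("bark", 2, "dessert", false),
    ("beef", 5, "dinner", false),
    ("bite", 6, "snack", false),
    ("bowl", 4, "lunch", false),
    ("breakfast", 0, "breakfast", false),
    ("burger", 4, "lunch", false),
    ("cake", 2, "dessert", false),
    ("casserole", 5, "dinner", false),
    ("chicken", 5, "dinner", false),
    ("chicken breast", 7, "dinner", true),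
    ("chocolate", 2, "dessert", false),
    ("cookie", 2, "dessert", false),
    ("crisp", 2, "dessert", false),
    ("crockpot", 5, "dinner", false),
    ("dessert", 2, "dessert", false),
    ("dip", 6, "snack", false),
    ("egg", 0, "breakfast", false),
    ("fish", 5, "dinner", false),
    ("fish", 7, "dinner", true),
    ("ground beef", 7, "dinner", true),
    ("meal prep", 3, "meal_prep", false),
    ("muffin", 0, "breakfast", false),
    ("oat", 0, "breakfast", false),
    ("pancake", 0, "breakfast", false),
    ("pork", 7, "dinner", true),
    ("protein", 6, "snack", false),
    ("protein shake", 1, "smoothie", false),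
    ("salad", 4, "lunch", false),
    ("salmon", 5, "dinner", false),
    ("sandwich", 4, "lunch", false),
    ("shake", 1, "smoothie", false),
    ("smoothie", 1, "smoothie", false),
    ("snack", 6, "snack", false),
    ("steak", 5, "dinner", false),
    ("steak", 7, "dinner", true),
    ("sweet", 2, "dessert", false),
    ("toast", 0, "breakfast", false),
    ("waffle", 0, "breakfast", false),
    ("wrap", 4, "lunch", false) ]

-- One iteration of Source B's loop: keep the match of strictly smaller priority.
def pvStep (tl il : String) (best : Option (Nat × String)) (e : String × Nat × String × Bool) :
    Option (Nat × String) :=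
  if (best.isNone || decide (e.2.1 < (best.getD (0, "")).1))
      && PySem.Str.isIn e.1 (if e.2.2.2 then il else tl)
  then some (e.2.1, e.2.2.1) else best

def determine_category_py_alt (title : String) (ingredients : String) : String :=
  let title_lower := PySem.Str.lower title
  let ingredients_lower := PySem.Str.lower ingredients
  match pvKeywords.foldl (pvStep title_lower ingredients_lower) none with
  | some (_, c) => c
  | none => "lunch"

-- ===== PRECONDITION & SPEC =====
def Spec_determine_category_py (title : String) (ingredients : String) (out : String) : Prop := out = determine_category_py_alt title ingredients
instance (title : String) (ingredients : String) (out : String) : Decidable (Spec_determine_category_py title ingredients out) := by unfold Spec_determine_category_py; infer_instance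

-- ===== CLAIM (what is proved, stated in full; the proofs are below) =====
def Claim_equal_determine_category_py : Prop := ∀ (title : String) (ingredients : String), Dom_determine_category_py title ingredients → Spec_determine_category_py title ingredients (determine_category_py title ingredients)

-- ===== LEMMAS AND PROOFS =====

-- The same keywords listed in A's rule order (groups of equal priority, flattened).
def pvOrdered : List (String × Nat × String × Bool) :=
  (["breakfast", "pancake", "waffle", "oat", "muffin", "toast", "egg"].map (fun t => (t, 0, "breakfast", false)))
  ++ ((["smoothie", "shake", "protein shake"].map (fun t => (t, 1, "smoothie", false)))
  ++ ((["cookie", "dessert", "chocolate", "cake", "sweet", "crisp", "bark"].map (fun t => (t, 2, "dessert", false)))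
  ++ ((["meal prep"].map (fun t => (t, 3, "meal_prep", false)))
  ++ ((["bowl", "salad", "sandwich", "wrap", "burger"].map (fun t => (t, 4, "lunch", false)))
  ++ ((["chicken", "beef", "salmon", "fish", "steak", "casserole", "crockpot"].map (fun t => (t, 5, "dinner", false)))
  ++ ((["protein", "bite", "snack", "dip"].map (fun t => (t, 6, "snack", false)))
  ++ (["chicken breast", "ground beef", "fish", "pork", "steak"].map (fun t => (t, 7, "dinner", true)))))))))

lemma pvKeywords_perm : pvKeywords.Perm pvOrdered := by decide

-- pvStep commutes on two elements whose priorities differ or whose categories agree.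
lemma pvStep_comm (tl il : String) (e₁ e₂ : String × Nat × String × Bool)
    (h : e₁.2.1 ≠ e₂.2.1 ∨ e₁.2.2.1 = e₂.2.2.1) (z : Option (Nat × String)) :
    pvStep tl il (pvStep tl il z e₁) e₂ = pvStep tl il (pvStep tl il z e₂) e₁ := by
  obtain ⟨t₁, p₁, c₁, u₁⟩ := e₁
  obtain ⟨t₂, p₂, c₂, u₂⟩ := e₂
  simp only [pvStep]
  by_cases m₁ : PySem.Str.isIn t₁ (if u₁ then il else tl) = true <;>
  by_cases m₂ : PySem.Str.isIn t₂ (if u₂ then il else tl) = true <;>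
  rcases z with _ | ⟨bp, bc⟩ <;>
  simp only [Option.isNone_none, Option.isNone_some, Option.getD_none, Option.getD_some,
    Bool.true_or, Bool.false_or, m₁, m₂, Bool.and_true, Bool.and_false,
    if_true, decide_eq_true_eq] <;>
  split_ifs <;> first | rfl | (rcases h with h | h <;> simp_all <;> omega)

-- A state of priority ≤ every remaining priority is never replaced.
lemma pvFold_absorb (tl il : String) (p : Nat) (c : String) :
    ∀ (L : List (String × Nat × String × Bool)), (∀ e ∈ L, p ≤ e.2.1) →
    L.foldl (pvStep tl il) (some (p, c)) = some (p, c) := by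
  intro L
  induction L with
  | nil => intro _; rfl
  | cons e L ih =>
    intro h
    have hp : p ≤ e.2.1 := h e (by simp)
    have : pvStep tl il (some (p, c)) e = some (p, c) := by
      simp only [pvStep, Option.isNone_some, Option.getD_some, Bool.false_or]
      have hc : ¬ ((decide (e.2.1 < p)
          && PySem.Str.isIn e.1 (if e.2.2.2 then il else tl)) = true) := by
        rw [Bool.and_eq_true]
        rintro ⟨h1, _⟩
        rw [decide_eq_true_eq] at h1
        omega
      exact if_neg hc
    rw [List.foldl_cons, this]
    exact ih (fun e he => h e (by simp [he]))

-- Folding a single constant-priority group from `none` is its any().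
lemma pvFold_group (tl il : String) (p : Nat) (c : String) (u : Bool) :
    ∀ (terms : List String),
    (terms.map (fun t => (t, p, c, u))).foldl (pvStep tl il) none
      = (if terms.any (fun t => PySem.Str.isIn t (if u then il else tl)) then some (p, c) else none) := by
  intro terms
  induction terms with
  | nil => rfl
  | cons t ts ih =>
    simp only [List.map_cons, List.foldl_cons, List.any_cons]
    by_cases h : PySem.Str.isIn t (if u then il else tl) = true
    · have h1 : pvStep tl il none (t, p, c, u) = some (p, c) := by
        simp only [pvStep, Option.isNone_none, Bool.true_or, Bool.true_and, h, if_true]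
      rw [h1, pvFold_absorb tl il p c]
      · simp only [h, Bool.true_or, reduceIte]
      · intro e he
        obtain ⟨x, _, hx⟩ := List.mem_map.mp he
        simp [← hx]
    · have h1 : pvStep tl il none (t, p, c, u) = none := by
        simp only [pvStep, Option.isNone_none, Bool.true_or, Bool.true_and,
          Bool.not_eq_true] at *
        simp only [h, Bool.false_eq_true, if_false]
      rw [Bool.not_eq_true] at h
      rw [h1, ih]
      simp only [h, Bool.false_or]

-- Peeling one constant-priority group off the front of the rule list.
lemma pvChainStep (tl il : String) (terms : List String) (p : Nat) (c : String) (u : Bool)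
    (rest : List (String × Nat × String × Bool)) (hrest : ∀ e ∈ rest, p ≤ e.2.1) :
    ((terms.map (fun t => (t, p, c, u))) ++ rest).foldl (pvStep tl il) none
      = (if terms.any (fun t => PySem.Str.isIn t (if u then il else tl)) then some (p, c)
         else rest.foldl (pvStep tl il) none) := by
  rw [List.foldl_append, pvFold_group]
  by_cases h : terms.any (fun t => PySem.Str.isIn t (if u then il else tl)) = true
  · rw [if_pos h, if_pos h, pvFold_absorb tl il p c rest hrest]
  · rw [if_neg h, if_neg h]

lemma pvOrdered_fold_eq (tl il : String) :
    (match pvOrdered.foldl (pvStep tl il) none with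
     | some (_, c) => c
     | none => "lunch") =
    (if ["breakfast", "pancake", "waffle", "oat", "muffin", "toast", "egg"].any
        (fun term => PySem.Str.isIn term tl) then "breakfast"
    else if ["smoothie", "shake", "protein shake"].any
        (fun term => PySem.Str.isIn term tl) then "smoothie"
    else if ["cookie", "dessert", "chocolate", "cake", "sweet", "crisp", "bark"].any
        (fun term => PySem.Str.isIn term tl) then "dessert"
    else if PySem.Str.isIn "meal prep" tl then "meal_prep"
    else if ["bowl", "salad", "sandwich", "wrap", "burger"].any
        (fun term => PySem.Str.isIn term tl) then "lunch"
    else if ["chicken", "beef", "salmon", "fish", "steak", "casserole", "crockpot"].any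
        (fun term => PySem.Str.isIn term tl) then "dinner"
    else if ["protein", "bite", "snack", "dip"].any
        (fun term => PySem.Str.isIn term tl) then "snack"
    else if ["chicken breast", "ground beef", "fish", "pork", "steak"].any
        (fun term => PySem.Str.isIn term il) then "dinner"
    else "lunch") := by
  have e1 : ∀ s₁ s₂ : String, (if (false : Bool) then s₁ else s₂) = s₂ := fun _ _ => rfl
  have e2 : ∀ s₁ s₂ : String, (if (true : Bool) then s₁ else s₂) = s₁ := fun _ _ => rfl
  unfold pvOrdered
  rw [pvChainStep tl il ["breakfast", "pancake", "waffle", "oat", "muffin", "toast", "egg"] 0 "breakfast" false ((["smoothie", "shake", "protein shake"].map (fun t => (t, 1, "smoothie", false))) ++ ((["cookie", "dessert", "chocolate", "cake", "sweet", "crisp", "bark"].map (fun t => (t, 2, "dessert", false))) ++ ((["meal prep"].map (fun t => (t, 3, "meal_prep", false))) ++ ((["bowl", "salad", "sandwich", "wrap", "burger"].map (fun t => (t, 4, "lunch", false))) ++ ((["chicken", "beef", "salmon", "fish", "steak", "casserole", "crockpot"].map (fun t => (t, 5, "dinner", false))) ++ ((["protein", "bite", "snack", "dip"].map (fun t =>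 (t, 6, "snack", false))) ++ (["chicken breast", "ground beef", "fish", "pork", "steak"].map (fun t => (t, 7, "dinner", true))))))))) (by decide)]
  rw [pvChainStep tl il ["smoothie", "shake", "protein shake"] 1 "smoothie" false ((["cookie", "dessert", "chocolate", "cake", "sweet", "crisp", "bark"].map (fun t => (t, 2, "dessert", false))) ++ ((["meal prep"].map (fun t => (t, 3, "meal_prep", false))) ++ ((["bowl", "salad", "sandwich", "wrap", "burger"].map (fun t => (t, 4, "lunch", false))) ++ ((["chicken", "beef", "salmon", "fish", "steak", "casserole", "crockpot"].map (fun t => (t, 5, "dinner", false))) ++ ((["protein", "bite", "snack", "dip"].map (fun t => (t, 6, "snack", false))) ++ (["chicken breast", "ground beef", "fish", "pork", "steak"].map (fun t => (t, 7, "dinner", true)))))))) (by decide)]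
  rw [pvChainStep tl il ["cookie", "dessert", "chocolate", "cake", "sweet", "crisp", "bark"] 2 "dessert" false ((["meal prep"].map (fun t => (t, 3, "meal_prep", false))) ++ ((["bowl", "salad", "sandwich", "wrap", "burger"].map (fun t => (t, 4, "lunch", false))) ++ ((["chicken", "beef", "salmon", "fish", "steak", "casserole", "crockpot"].map (fun t => (t, 5, "dinner", false))) ++ ((["protein", "bite", "snack", "dip"].map (fun t => (t, 6, "snack", false))) ++ (["chicken breast", "ground beef", "fish", "pork", "steak"].map (fun t => (t, 7, "dinner", true))))))) (by decide)]
  rw [pvChainStep tl il ["meal prep"] 3 "meal_prep" false ((["bowl", "salad", "sandwich", "wrap", "burger"].map (fun t => (t, 4, "lunch", false))) ++ ((["chicken", "beef", "salmon", "fish", "steak", "casserole", "crockpot"].map (fun t => (t, 5, "dinner", false))) ++ ((["protein", "bite", "snack", "dip"].map (fun t => (t, 6, "snack", false))) ++ (["chicken breast", "ground beef", "fish", "pork", "steak"].map (fun t => (t, 7, "dinner", true)))))) (by decide)]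
  rw [pvChainStep tl il ["bowl", "salad", "sandwich", "wrap", "burger"] 4 "lunch" false ((["chicken", "beef", "salmon", "fish", "steak", "casserole", "crockpot"].map (fun t => (t, 5, "dinner", false))) ++ ((["protein", "bite", "snack", "dip"].map (fun t => (t, 6, "snack", false))) ++ (["chicken breast", "ground beef", "fish", "pork", "steak"].map (fun t => (t, 7, "dinner", true))))) (by decide)]
  rw [pvChainStep tl il ["chicken", "beef", "salmon", "fish", "steak", "casserole", "crockpot"] 5 "dinner" false ((["protein", "bite", "snack", "dip"].map (fun t => (t, 6, "snack", false))) ++ (["chicken breast", "ground beef", "fish", "pork", "steak"].map (fun t => (t, 7, "dinner", true)))) (by decide)]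
  rw [pvChainStep tl il ["protein", "bite", "snack", "dip"] 6 "snack" false (["chicken breast", "ground beef", "fish", "pork", "steak"].map (fun t => (t, 7, "dinner", true))) (by decide)]
  rw [pvFold_group tl il 7 "dinner" true]
  simp only [e1, List.any_cons, List.any_nil, Bool.or_false]
  split_ifs <;> rfl

-- ===== VERDICT (by name: the statement is the Claim_ definition above) =====
lemma pvPairs : ∀ x ∈ pvKeywords, ∀ y ∈ pvKeywords, x.2.1 ≠ y.2.1 ∨ x.2.2.1 = y.2.2.1 := by
  decide

set_option maxRecDepth 10000 in
theorem determine_category_py_spec : Claim_equal_determine_category_py := by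
  intro title ingredients _
  unfold Spec_determine_category_py determine_category_py determine_category_py_alt
  have hperm : List.foldl (pvStep (PySem.Str.lower title) (PySem.Str.lower ingredients)) none pvKeywords
      = List.foldl (pvStep (PySem.Str.lower title) (PySem.Str.lower ingredients)) none pvOrdered :=
    List.Perm.foldl_eq' pvKeywords_perm
      (fun x hx y hy z => pvStep_comm _ _ x y (pvPairs x hx y hy) z) none
  simp only [hperm]
  exact (pvOrdered_fold_eq _ _).symm
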